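-- pv_equiv track=rewrite | github.com/JFan5/Safety-gen | ferry/convert_pddl3.py | pick_checkpoint_for_car
-- ===== SOURCE A (Python) =====
-- from typing import Dict, List, Tuple, Set, Optional
--
-- def pick_checkpoint_for_car(all_locations: Set[str], car_init: Optional[str], car_goal: Optional[str],
--                             ferry_start: Optional[str]) -> Optional[str]:
--     """
--     选择一个检查点位置：
--       1) 不是 car 的 init，也不是 car 的 goal；
--       2) 优先也不是渡轮起点（避免“刚好起点就满足”导致约束失效）。
--     若找不到严格满足 1)+2) 的，就退而求其次找 != goal 的；仍找不到则返回 None。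
--     """
--     candidates = [l for l in sorted(all_locations) if l not in {car_init, car_goal}]
--     # 优先非 ferry_start
--     pref = [l for l in candidates if l != ferry_start]
--     if pref:
--         return pref[0]
--     if candidates:
--         return candidates[0]
--     # 退而求其次：只要 != goal 也行（避免与目标相同导致 vacuous/不可能）
--     fallback = [l for l in sorted(all_locations) if l != car_goal]
--     return fallback[0] if fallback else None
-- ===== SOURCE B (Python) =====
-- def pick_checkpoint_for_car(all_locations, car_init, car_goal, ferry_start):
--     # One linear pass maintaining three running minima instead of sorting.
--     m1 = m2 = m3 = None   # m1: != init/goal/ferry_start, m2: != init/goal, m3: != goal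
--     for l in all_locations:
--         if l != car_goal:
--             if m3 is None or l < m3:
--                 m3 = l
--             if l != car_init:
--                 if m2 is None or l < m2:
--                     m2 = l
--                 if l != ferry_start:
--                     if m1 is None or l < m1:
--                         m1 = l
--     return m1 if m1 is not None else (m2 if m2 is not None else m3)
-- ===== Notes on version B (the rewrite author's own statement) =====
-- stated objective: alternative
-- what changed: Replaces A's sort-then-filter passes and head picks by a single linear pass over the locations maintaining three running minima (non-init/goal/ferry-start, non-init/goal, non-goal) and returning the first defined one; intended as faster (O(n) vs O(n log n)) but measured only ~1.5x at the largest size.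
import Mathlib
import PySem

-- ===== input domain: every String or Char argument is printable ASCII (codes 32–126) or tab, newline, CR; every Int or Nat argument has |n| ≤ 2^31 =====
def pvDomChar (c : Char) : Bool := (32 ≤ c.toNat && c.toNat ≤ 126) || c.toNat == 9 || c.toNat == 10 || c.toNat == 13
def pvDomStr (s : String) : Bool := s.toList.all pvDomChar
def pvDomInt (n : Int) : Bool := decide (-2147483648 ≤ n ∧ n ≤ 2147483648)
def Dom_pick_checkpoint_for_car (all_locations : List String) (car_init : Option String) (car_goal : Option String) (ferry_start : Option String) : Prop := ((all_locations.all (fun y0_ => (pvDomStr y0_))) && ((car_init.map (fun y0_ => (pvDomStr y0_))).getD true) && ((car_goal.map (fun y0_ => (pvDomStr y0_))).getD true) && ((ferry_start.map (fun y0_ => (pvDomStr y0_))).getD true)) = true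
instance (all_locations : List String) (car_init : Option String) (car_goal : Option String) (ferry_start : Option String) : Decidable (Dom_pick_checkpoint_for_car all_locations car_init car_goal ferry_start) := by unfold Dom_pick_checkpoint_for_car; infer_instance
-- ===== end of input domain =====

-- B replaces A's sort-then-filter passes by one linear pass keeping three running minima.

-- ===== PORT A =====
def pick_checkpoint_for_car (all_locations : List String) (car_init : Option String) (car_goal : Option String) (ferry_start : Option String) : Option String :=
  let candidates := (PySem.List.sorted all_locations (fun x => x) false).filter
      (fun l => !(some l == car_init || some l == car_goal))
  let pref := candidates.filter (fun l => !(some l == ferry_start))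
  if pref ≠ [] then pref.head?
  else if candidates ≠ [] then candidates.head?
  else
    let fallback := (PySem.List.sorted all_locations (fun x => x) false).filter
        (fun l => !(some l == car_goal))
    if fallback ≠ [] then fallback.head? else none

-- ===== PORT B =====
-- B-side helper: the 'if m is None or l < m: m = l' running-minimum update
def updMin (m : Option String) (l : String) : Option String :=
  match m with
  | none => some l
  | some c => if l < c then some l else some c

-- one pass; m1 : min ≠init/goal/ferry, m2 : min ≠init/goal, m3 : min ≠goal
def pick_checkpoint_for_car_alt (all_locations : List String) (car_init : Option String) (car_goal : Option String) (ferry_start : Option String) : Option String :=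
  let r := all_locations.foldl
    (fun (acc : Option String × Option String × Option String) l =>
      if (some l == car_goal) = false then
        let m3 := updMin acc.2.2 l
        if (some l == car_init) = false then
          let m2 := updMin acc.2.1 l
          if (some l == ferry_start) = false then (updMin acc.1 l, m2, m3)
          else (acc.1, m2, m3)
        else (acc.1, acc.2.1, m3)
      else acc) (none, none, none)
  match r.1, r.2.1, r.2.2 with
  | some m1, _, _ => some m1
  | none, some m2, _ => some m2
  | none, none, m3 => m3

-- ===== PRECONDITION & SPEC =====
def Spec_pick_checkpoint_for_car (all_locations : List String) (car_init : Option String) (car_goal : Option String) (ferry_start : Option String) (out : Option String) : Prop := out = pick_checkpoint_for_car_alt all_locations car_init car_goal ferry_start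
instance (all_locations : List String) (car_init : Option String) (car_goal : Option String) (ferry_start : Option String) (out : Option String) : Decidable (Spec_pick_checkpoint_for_car all_locations car_init car_goal ferry_start out) := by unfold Spec_pick_checkpoint_for_car; infer_instance

-- ===== CLAIM (what is proved, stated in full; the proofs are below) =====
def Claim_equal_pick_checkpoint_for_car : Prop := ∀ (all_locations : List String) (car_init : Option String) (car_goal : Option String) (ferry_start : Option String), Dom_pick_checkpoint_for_car all_locations car_init car_goal ferry_start → Spec_pick_checkpoint_for_car all_locations car_init car_goal ferry_start (pick_checkpoint_for_car all_locations car_init car_goal ferry_start)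

-- ===== LEMMAS AND PROOFS =====

def minOpt (ys : List String) : Option String := ys.foldl updMin none

lemma updMin_some (c : String) (l : String) : updMin (some c) l = some (min c l) := by
  by_cases h : l < c
  · simp [updMin, h, min_eq_right h.le]
  · simp [updMin, h, min_eq_left (not_lt.mp h)]

lemma foldl_updMin_some (t : List String) (c : String) :
    t.foldl updMin (some c) = some (t.foldl min c) := by
  induction t generalizing c with
  | nil => rfl
  | cons x s ih => simp [List.foldl_cons, updMin_some, ih]

lemma minOpt_eq_min? (ys : List String) :
    minOpt ys = PySem.List.min? ys (fun y => y) := by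
  cases ys with
  | nil => rfl
  | cons l t =>
    rw [PySem.List.min?_id_cons]
    simpa [minOpt, List.foldl_cons, updMin] using foldl_updMin_some t l

lemma minOpt_eq_none_iff (ys : List String) : minOpt ys = none ↔ ys = [] := by
  rw [minOpt_eq_min?, PySem.List.min?_eq_none_iff]

lemma filter_sorted_eq (xs : List String) (p : String → Bool) :
    (PySem.List.sorted xs (fun x => x) false).filter p
      = PySem.List.sorted (xs.filter p) (fun x => x) false := by
  refine (PySem.List.sorted_id_eq_of_perm_of_pairwise _ _ ?_ ?_).symm
  · exact (PySem.List.sorted_perm xs (fun x => x) false).filter p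
  · exact (PySem.List.sorted_pairwise xs (fun x => x)).filter p

-- the head of sorted(ys) is the running minimum of ys
lemma head_sorted_eq_minOpt (ys : List String) :
    (PySem.List.sorted ys (fun x => x) false).head? = minOpt ys := by
  rw [minOpt_eq_min?]
  cases hs : PySem.List.sorted ys (fun x => x) false with
  | nil =>
    have : ys = [] := (PySem.List.sorted_eq_nil_iff ys _ false).mp hs
    subst this; rfl
  | cons m t =>
    have hmem : m ∈ ys := by
      have hm : m ∈ PySem.List.sorted ys (fun x => x) false := by
        rw [hs]; exact List.mem_cons_self
      exact (PySem.List.mem_sorted ys _ false m).mp hm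
    have hne : ys ≠ [] := by rintro rfl; simp at hmem
    cases hv : PySem.List.min? ys (fun y => y) with
    | none => exact absurd ((PySem.List.min?_eq_none_iff ys _).mp hv) hne
    | some v =>
      have hvmem : v ∈ ys := PySem.List.min?_mem hv
      have h1 : m ≤ v := PySem.List.key_head_sorted_le ys (fun x => x) hs v hvmem
      have h2 : v ≤ m := PySem.List.min?_isMin hv m hmem
      simp [le_antisymm h1 h2]

def condUpd (p : String → Bool) (m : Option String) (l : String) : Option String :=
  if p l then updMin m l else m

lemma foldl_condUpd (xs : List String) (p : String → Bool) :
    xs.foldl (condUpd p) none = minOpt (xs.filter p) := by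
  rw [minOpt, List.foldl_filter]; rfl

lemma foldl_triple (xs : List String) (g1 g2 g3 : Option String → String → Option String)
    (a b c : Option String) :
    xs.foldl (fun acc l => (g1 acc.1 l, g2 acc.2.1 l, g3 acc.2.2 l)) (a, b, c)
      = (xs.foldl g1 a, xs.foldl g2 b, xs.foldl g3 c) := by
  induction xs generalizing a b c with
  | nil => rfl
  | cons x t ih => simp [List.foldl_cons, ih]

-- B's fold body splits into three independent conditional-minimum updates
lemma body_eq (ci cg fs : Option String) :
    (fun (acc : Option String × Option String × Option String) (l : String) =>
      if (some l == cg) = false then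
        let m3 := updMin acc.2.2 l
        if (some l == ci) = false then
          let m2 := updMin acc.2.1 l
          if (some l == fs) = false then (updMin acc.1 l, m2, m3)
          else (acc.1, m2, m3)
        else (acc.1, acc.2.1, m3)
      else acc)
    = (fun acc l =>
      (condUpd (fun l => !(some l == cg) && (!(some l == ci) && !(some l == fs))) acc.1 l,
       condUpd (fun l => !(some l == cg) && !(some l == ci)) acc.2.1 l,
       condUpd (fun l => !(some l == cg)) acc.2.2 l)) := by
  funext acc l
  simp only [condUpd]
  by_cases h1 : (some l == cg) = false <;> by_cases h2 : (some l == ci) = false <;>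
    by_cases h3 : (some l == fs) = false <;>
    simp_all

lemma filter_pref_eq (xs : List String) (ci cg fs : Option String) :
    xs.filter (fun a => !(some a == fs) && !(some a == ci || some a == cg))
      = xs.filter (fun l => !(some l == cg) && (!(some l == ci) && !(some l == fs))) := by
  refine List.filter_congr ?_
  intro a _
  cases h1 : (some a == cg) <;> cases h2 : (some a == ci) <;> cases h3 : (some a == fs) <;> simp

lemma filter_cand_eq (xs : List String) (ci cg : Option String) :
    xs.filter (fun l => !(some l == ci || some l == cg))
      = xs.filter (fun l => !(some l == cg) && !(some l == ci)) := by
  refine List.filter_congr ?_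
  intro a _
  cases h1 : (some a == cg) <;> cases h2 : (some a == ci) <;> simp

-- ===== VERDICT (by name: the statement is the Claim_ definition above) =====
theorem pick_checkpoint_for_car_spec : Claim_equal_pick_checkpoint_for_car := by
  intro xs ci cg fs _
  unfold Spec_pick_checkpoint_for_car pick_checkpoint_for_car pick_checkpoint_for_car_alt
  rw [body_eq, foldl_triple, foldl_condUpd, foldl_condUpd, foldl_condUpd]
  simp only [List.filter_filter, filter_sorted_eq, head_sorted_eq_minOpt]
  rw [filter_pref_eq, filter_cand_eq]
  simp only [Ne, PySem.List.sorted_eq_nil_iff, ← minOpt_eq_none_iff]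
  rcases minOpt (xs.filter (fun l => !(some l == cg) && (!(some l == ci) && !(some l == fs)))) with _ | v1 <;>
  rcases minOpt (xs.filter (fun l => !(some l == cg) && !(some l == ci))) with _ | v2 <;>
  rcases minOpt (xs.filter (fun l => !(some l == cg))) with _ | v3 <;>
    simp
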